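-- pv_equiv track=rewrite | github.com/Anson-Saju-George/dsx86 | Infosys_Prep/Trees_Graphs/001_subtree_aggregation.py | subtree_min
-- ===== SOURCE A (Python) =====
-- def subtree_min(n, par, val):
--     tree = [[] for _ in range(n+1)]
--     for i in range(2, n+1):
--         tree[par[i]].append(i)
--
--     res = [0]*(n+1)
--
--     def dfs(u):
--         m = val[u]
--         for v in tree[u]:
--             m = min(m, dfs(v))
--         res[u] = m
--         return m
--
--     dfs(1)
--     return res[1:]
-- ===== SOURCE B (Python) =====
-- def subtree_min(n, par, val):
--     # Iterative: build the same children adjacency, collect BFS levels from the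
--     # root (reachable depth is < n, so n expansions suffice), then relax each
--     # node bottom-up, deepest level first.  No recursion.
--     children = [[] for _ in range(n + 1)]
--     for i in range(2, n + 1):
--         children[par[i]].append(i)
--     levels = [[1]]
--     for _ in range(n):
--         levels.append([c for u in levels[-1] for c in children[u]])
--     res = [0] * (n + 1)
--     for level in reversed(levels):
--         for u in level:
--             m = val[u]
--             for c in children[u]:
--                 if res[c] < m:
--                     m = res[c]
--             res[u] = m
--     return res[1:]
-- ===== Notes on version B (the rewrite author's own statement) =====
-- stated objective: alternative
-- what changed: The recursive DFS over the children adjacency is replaced by an iterative scheme: collect BFS levels from the root and then relax res[u] = min(val[u], min of children's res) level by level, deepest first, so no recursion (and no recursion-depth limit) is needed.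
-- outside the precondition, e.g. on subtree_min(3, [0, 0, 3, 2], [9, 5]): A returns [5, 0, 0], B returns [5, 0, 0]
import Mathlib
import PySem

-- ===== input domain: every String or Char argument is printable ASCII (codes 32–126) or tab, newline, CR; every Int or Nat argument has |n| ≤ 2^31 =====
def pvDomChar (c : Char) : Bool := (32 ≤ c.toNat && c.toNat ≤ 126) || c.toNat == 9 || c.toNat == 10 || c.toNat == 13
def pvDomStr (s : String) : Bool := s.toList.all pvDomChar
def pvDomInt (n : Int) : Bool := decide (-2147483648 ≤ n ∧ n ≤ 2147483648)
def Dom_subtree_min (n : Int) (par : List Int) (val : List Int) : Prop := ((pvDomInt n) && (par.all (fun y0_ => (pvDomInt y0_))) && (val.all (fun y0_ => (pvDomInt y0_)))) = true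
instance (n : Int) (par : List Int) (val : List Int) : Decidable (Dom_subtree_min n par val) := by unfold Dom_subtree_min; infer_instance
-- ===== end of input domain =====

-- B replaces A's recursive DFS by an iterative BFS-levels pass followed by a
-- bottom-up (deepest level first) relaxation; an alternative of the same cost.


-- ===== PORT A =====
-- shared helper: 'tree = [[] for _ in range(n+1)]; for i in range(2, n+1): tree[par[i]].append(i)'
-- (this loop is textually identical in A and in B; tree[p] for negative p is
-- Python's wraparound, written out as 'p + len(t)')
def pvBuild (n : Int) (par : List Int) : List (List Int) :=
  (PySem.List.pyRange 2 (n + 1) 1).foldl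
    (fun t i =>
      let p := (PySem.List.pyGet? par i).getD 0
      let j := (if p < 0 then p + (t.length : Int) else p).toNat
      t.set j ((t.getD j []) ++ [i]))
    (List.replicate (n.toNat + 1) [])

-- 'def dfs(u)' of A, with a fuel argument for termination (n+1 is enough on
-- every input Pre_ admits; see dfsA_ok below)
def dfsA (tree : List (List Int)) (val : List Int) : Nat → Int → List Int → List Int × Int
  | 0, _, res => (res, 0)
  | fuel + 1, u, res =>
    let p := (tree.getD u.toNat []).foldl
      (fun (st : List Int × Int) v =>
        let r := dfsA tree val fuel v st.1
        (r.1, min st.2 r.2))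
      (res, (PySem.List.pyGet? val u).getD 0)
    (p.1.set u.toNat p.2, p.2)

def subtree_min (n : Int) (par : List Int) (val : List Int) : List Int :=
  let tree := pvBuild n par
  let res0 : List Int := List.replicate (n.toNat + 1) 0
  let out := dfsA tree val (n.toNat + 1) 1 res0
  PySem.List.slice out.1 (some 1) none    -- res[1:]

-- ===== PORT B =====
def subtree_min_alt (n : Int) (par : List Int) (val : List Int) : List Int :=
  let tree := pvBuild n par
  -- levels = [[1]]; for _ in range(n): levels.append([c for u in levels[-1] for c in children[u]])
  let levels := (List.range n.toNat).foldl
    (fun (ls : List (List Int)) _ =>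
      ls ++ [(ls.getLast?.getD []).flatMap (fun u => tree.getD u.toNat [])])
    [[(1 : Int)]]
  let res0 : List Int := List.replicate (n.toNat + 1) 0
  let res := levels.reverse.foldl
    (fun r level =>
      level.foldl
        (fun (r : List Int) u =>
          let m := (tree.getD u.toNat []).foldl
            (fun m c => if r.getD c.toNat 0 < m then r.getD c.toNat 0 else m)
            ((PySem.List.pyGet? val u).getD 0)
          r.set u.toNat m)
        r)
    res0
  PySem.List.slice res (some 1) none    -- res[1:]

-- ===== PRECONDITION & SPEC =====
-- Pre_ asks for len(val) ≥ n+1 although A (and B) read val[u] only at nodes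
-- reachable from node 1, so on some shorter-val inputs with unreachable nodes
-- both still return (identically); 'which indices get read' is reachability,
-- not a closed-form shape, hence this slightly wider length requirement.
def Pre_subtree_min (n : Int) (par : List Int) (val : List Int) : Prop :=
  1 ≤ n ∧ (2 ≤ n → n + 1 ≤ (par.length : Int)) ∧ n + 1 ≤ (val.length : Int) ∧
  ∀ i : Nat, i < n.toNat + 1 → 2 ≤ i → (-(n + 1) ≤ par.getD i 0 ∧ par.getD i 0 ≤ n)
instance (n : Int) (par : List Int) (val : List Int) : Decidable (Pre_subtree_min n par val) := by
  unfold Pre_subtree_min; infer_instance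

def pvWitness_subtree_min : Int × List Int × List Int := (3, [0, 0, 1, 1], [0, 5, 2, 4])

def Spec_subtree_min (n : Int) (par : List Int) (val : List Int) (out : List Int) : Prop := out = subtree_min_alt n par val
instance (n : Int) (par : List Int) (val : List Int) (out : List Int) : Decidable (Spec_subtree_min n par val out) := by unfold Spec_subtree_min; infer_instance

-- ===== CLAIM (what is proved, stated in full; the proofs are below) =====
def Claim_equal_subtree_min : Prop := ∀ (n : Int) (par : List Int) (val : List Int), Dom_subtree_min n par val → Pre_subtree_min n par val → Spec_subtree_min n par val (subtree_min n par val)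

-- ===== LEMMAS AND PROOFS =====

-- the parent map the adjacency encodes: index of tree[par[c]] (with wraparound)
def pvP (n : Int) (par : List Int) (c : Int) : Int :=
  let p := (PySem.List.pyGet? par c).getD 0
  if p < 0 then p + (n + 1) else p

-- canonical children list of node u
def pvKids (n : Int) (par : List Int) (u : Int) : List Int :=
  (PySem.List.pyRange 2 (n + 1) 1).filter (fun i => pvP n par i == u)

-- 'v is reached from u in t parent-steps'
def pvCh (n : Int) (par : List Int) : Nat → Int → Int → Prop
  | 0, u, v => v = u
  | t + 1, u, v => 2 ≤ v ∧ v ≤ n ∧ pvCh n par t u (pvP n par v)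

def pvReach (n : Int) (par : List Int) (v : Int) : Prop := ∃ t, pvCh n par t 1 v
def pvDesc (n : Int) (par : List Int) (u v : Int) : Prop := ∃ t, pvCh n par t u v

-- subtree minimum, defined with fuel (pvSminF_irrel shows the fuel is irrelevant)
def pvSminF (n : Int) (par val : List Int) : Nat → Int → Int
  | 0, _ => 0
  | f + 1, u => (pvKids n par u).foldl (fun m c => min m (pvSminF n par val f c))
      ((PySem.List.pyGet? val u).getD 0)

def pvSM (n : Int) (par val : List Int) (u : Int) : Int := pvSminF n par val n.toNat u

-- -- basic facts --

theorem pvCh_node (n : Int) (par : List Int) (hn : 1 ≤ n) :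
    ∀ (t : Nat) (u : Int), pvCh n par t 1 u → 1 ≤ u ∧ u ≤ n := by
  intro t u h
  cases t with
  | zero => simp [pvCh] at h; omega
  | succ t => simp [pvCh] at h; omega

theorem pvCh_unique (n : Int) (par : List Int) :
    ∀ (t s : Nat) (v : Int), pvCh n par t 1 v → pvCh n par s 1 v → t = s := by
  intro t
  induction t with
  | zero =>
    intro s v h1 h2
    cases s with
    | zero => rfl
    | succ s => simp [pvCh] at h1 h2; omega
  | succ t ih =>
    intro s v h1 h2
    cases s with
    | zero => simp [pvCh] at h1 h2; omega
    | succ s =>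
      simp [pvCh] at h1 h2
      exact congrArg Nat.succ (ih s _ h1.2.2 h2.2.2)

-- the parent chain of a node, as a list
def pvChL (n : Int) (par : List Int) : Nat → Int → List Int
  | 0, v => [v]
  | t + 1, v => v :: pvChL n par t (pvP n par v)

theorem pvChL_length (n : Int) (par : List Int) :
    ∀ (t : Nat) (v : Int), (pvChL n par t v).length = t + 1 := by
  intro t
  induction t with
  | zero => intro v; rfl
  | succ t ih => intro v; simp [pvChL, ih]

theorem pvChL_mem (n : Int) (par : List Int) :
    ∀ (t : Nat) (v x : Int), pvCh n par t 1 v → x ∈ pvChL n par t v →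
      ∃ s, s ≤ t ∧ pvCh n par s 1 x := by
  intro t
  induction t with
  | zero =>
    intro v x hc hm
    simp [pvChL] at hm
    exact ⟨0, le_refl _, by simpa [hm] using hc⟩
  | succ t ih =>
    intro v x hc hm
    simp [pvChL] at hm
    rcases hm with hm | hm
    · exact ⟨t + 1, le_refl _, by simpa [hm] using hc⟩
    · simp [pvCh] at hc
      obtain ⟨s, hs, h⟩ := ih _ x hc.2.2 hm
      exact ⟨s, by omega, h⟩

theorem pvChL_nodup (n : Int) (par : List Int) :
    ∀ (t : Nat) (v : Int), pvCh n par t 1 v → (pvChL n par t v).Nodup := by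
  intro t
  induction t with
  | zero => intro v _; simp [pvChL]
  | succ t ih =>
    intro v hc
    have hc' : pvCh n par t 1 (pvP n par v) := by simp [pvCh] at hc; exact hc.2.2
    refine List.nodup_cons.mpr ⟨?_, ih _ hc'⟩
    intro hm
    obtain ⟨s, hs, h⟩ := pvChL_mem n par t _ v hc' hm
    have := pvCh_unique n par (t + 1) s v hc h
    omega

theorem pvCh_bound (n : Int) (par : List Int) (hn : 1 ≤ n) :
    ∀ (t : Nat) (v : Int), pvCh n par t 1 v → t < n.toNat := by
  intro t v hc
  have hsub : (pvChL n par t v).toFinset ⊆ Finset.Icc (1 : Int) n := by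
    intro x hx
    rw [List.mem_toFinset] at hx
    obtain ⟨s, _, h⟩ := pvChL_mem n par t v x hc hx
    have := pvCh_node n par hn s x h
    simp [Finset.mem_Icc]; omega
  have hcard := Finset.card_le_card hsub
  rw [List.toFinset_card_of_nodup (pvChL_nodup n par t v hc), pvChL_length] at hcard
  rw [Int.card_Icc] at hcard
  omega

-- -- children --

theorem pvKids_mem (n : Int) (par : List Int) (u c : Int) :
    c ∈ pvKids n par u ↔ (2 ≤ c ∧ c < n + 1 ∧ pvP n par c = u) := by
  simp [pvKids, List.mem_filter, PySem.List.mem_pyRange_one]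
  tauto

theorem pvCh_kid (n : Int) (par : List Int) (t : Nat) (u c : Int)
    (hc : pvCh n par t 1 u) (hk : c ∈ pvKids n par u) : pvCh n par (t + 1) 1 c := by
  rw [pvKids_mem] at hk
  exact ⟨hk.1, by omega, by rw [hk.2.2]; exact hc⟩

theorem pvDesc_self (n : Int) (par : List Int) (u : Int) : pvDesc n par u u := ⟨0, rfl⟩

theorem pvCh_snoc (n : Int) (par : List Int) (u c : Int) (h2 : 2 ≤ c) (hcn : c ≤ n)
    (hp : pvP n par c = u) : ∀ (s : Nat) (v : Int), pvCh n par s c v → pvCh n par (s + 1) u v := by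
  intro s
  induction s with
  | zero =>
    intro v hv
    simp [pvCh] at hv
    exact ⟨by omega, by omega, by rw [hv, hp]; rfl⟩
  | succ s ih =>
    intro v hv
    obtain ⟨h1, h2', h3⟩ := hv
    exact ⟨h1, h2', ih _ h3⟩

theorem pvDesc_kid (n : Int) (par : List Int) (u c v : Int) (hk : c ∈ pvKids n par u)
    (hd : pvDesc n par c v) : pvDesc n par u v := by
  rw [pvKids_mem] at hk
  obtain ⟨s, hs⟩ := hd
  exact ⟨s + 1, pvCh_snoc n par u c hk.1 (by omega) hk.2.2 s v hs⟩

theorem pvCh_decomp (n : Int) (par : List Int) (u : Int) :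
    ∀ (t : Nat) (v : Int), pvCh n par (t + 1) u v →
      ∃ c, c ∈ pvKids n par u ∧ pvDesc n par c v := by
  intro t
  induction t with
  | zero =>
    intro v ht
    obtain ⟨h1, h2, h3⟩ := ht
    exact ⟨v, (pvKids_mem n par u v).mpr ⟨h1, by omega, h3⟩, pvDesc_self n par v⟩
  | succ t ih =>
    intro v ht
    obtain ⟨h1, h2, h3⟩ := ht
    obtain ⟨c, hc, s, hs⟩ := ih _ h3
    exact ⟨c, hc, s + 1, h1, h2, hs⟩

theorem pvDesc_decomp (n : Int) (par : List Int) (u v : Int) (hd : pvDesc n par u v)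
    (hne : v ≠ u) : ∃ c, c ∈ pvKids n par u ∧ pvDesc n par c v := by
  obtain ⟨t, ht⟩ := hd
  cases t with
  | zero => exact absurd ht hne
  | succ t => exact pvCh_decomp n par u t v ht

-- -- fuel irrelevance of pvSminF --

theorem pvSminF_irrel (n : Int) (par val : List Int) (hn : 1 ≤ n) :
    ∀ (f1 : Nat) (t : Nat) (u : Int) (f2 : Nat), pvCh n par t 1 u →
      n.toNat ≤ t + f1 → n.toNat ≤ t + f2 →
      pvSminF n par val f1 u = pvSminF n par val f2 u := by
  intro f1
  induction f1 with
  | zero =>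
    intro t u f2 hc h1 h2
    have := pvCh_bound n par hn t u hc
    omega
  | succ g ih =>
    intro t u f2 hc h1 h2
    cases f2 with
    | zero =>
      have := pvCh_bound n par hn t u hc
      omega
    | succ g2 =>
      simp only [pvSminF]
      apply PySem.List.foldl_congr_mem
      intro m c hm
      have hk : c ∈ pvKids n par u := hm
      have hc' := pvCh_kid n par t u c hc hk
      rw [ih (t + 1) c g2 hc' (by omega) (by omega)]

theorem pvGetD_set {α : Type} (l : List α) (i j : Nat) (a d : α) (hi : i < l.length) :
    (l.set i a).getD j d = if i = j then a else l.getD j d := by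
  simp only [List.getD_eq_getElem?_getD, List.getElem?_set]
  split_ifs with h
  · subst h; simp [List.getElem?_eq_getElem hi]
  · rfl

theorem pvGetD_replicate {α : Type} (m i : Nat) (x : α) :
    (List.replicate m x).getD i x = x := by
  simp only [List.getD_eq_getElem?_getD, List.getElem?_replicate]
  split <;> rfl

theorem pvFlatMap_congr {α β : Type} (l : List α) (f g : α → List β)
    (h : ∀ x ∈ l, f x = g x) : l.flatMap f = l.flatMap g := by
  induction l with
  | nil => rfl
  | cons x l ih =>
    simp only [List.flatMap_cons]
    rw [h x (by simp), ih (fun y hy => h y (by simp [hy]))]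

theorem pvSM_unfold (n : Int) (par val : List Int) (hn : 1 ≤ n) (t : Nat) (u : Int)
    (hc : pvCh n par t 1 u) :
    pvSM n par val u = (pvKids n par u).foldl
      (fun m c => min m (pvSM n par val c)) ((PySem.List.pyGet? val u).getD 0) := by
  have hb := pvCh_bound n par hn t u hc
  have hg : n.toNat - 1 + 1 = n.toNat := by omega
  show pvSminF n par val n.toNat u = _
  rw [← hg]
  simp only [pvSminF]
  apply PySem.List.foldl_congr_mem
  intro m c hm
  have hc' := pvCh_kid n par t u c hc hm
  rw [pvSminF_irrel n par val hn (n.toNat - 1) (t + 1) c n.toNat hc' (by omega) (by omega)]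
  rfl

-- -- A-side: correctness of dfsA --

theorem dfsA_fold (n : Int) (par val : List Int) (tree : List (List Int)) (u : Int) (g : Nat)
    (Hrec : ∀ c, c ∈ pvKids n par u → ∀ res : List Int, res.length = n.toNat + 1 →
      (dfsA tree val g c res).2 = pvSM n par val c ∧
      (dfsA tree val g c res).1.length = n.toNat + 1 ∧
      ∀ j : Int, 0 ≤ j →
        (pvDesc n par c j → (dfsA tree val g c res).1.getD j.toNat 0 = pvSM n par val j) ∧
        (¬ pvDesc n par c j → (dfsA tree val g c res).1.getD j.toNat 0 = res.getD j.toNat 0)) :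
    ∀ (ks : List Int), (∀ c ∈ ks, c ∈ pvKids n par u) →
    ∀ (res : List Int) (m : Int), res.length = n.toNat + 1 →
      (ks.foldl (fun (st : List Int × Int) v =>
          let r := dfsA tree val g v st.1
          (r.1, min st.2 r.2)) (res, m)).2
        = ks.foldl (fun m c => min m (pvSM n par val c)) m ∧
      (ks.foldl (fun (st : List Int × Int) v =>
          let r := dfsA tree val g v st.1
          (r.1, min st.2 r.2)) (res, m)).1.length = n.toNat + 1 ∧
      ∀ j : Int, 0 ≤ j →
        ((∃ c ∈ ks, pvDesc n par c j) →
          (ks.foldl (fun (st : List Int × Int) v =>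
            let r := dfsA tree val g v st.1
            (r.1, min st.2 r.2)) (res, m)).1.getD j.toNat 0 = pvSM n par val j) ∧
        ((¬ ∃ c ∈ ks, pvDesc n par c j) →
          (ks.foldl (fun (st : List Int × Int) v =>
            let r := dfsA tree val g v st.1
            (r.1, min st.2 r.2)) (res, m)).1.getD j.toNat 0 = res.getD j.toNat 0) := by
  intro ks
  induction ks with
  | nil =>
    intro _ res m hres
    refine ⟨rfl, hres, ?_⟩
    intro j _
    refine ⟨?_, fun _ => rfl⟩
    rintro ⟨c, hc, -⟩
    exact absurd hc (by simp)
  | cons c ks ih =>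
    intro hks res m hres
    obtain ⟨h2, hlen, hj⟩ := Hrec c (hks c (by simp)) res hres
    rw [List.foldl_cons, List.foldl_cons]
    have hstep : (let r := dfsA tree val g c (res, m).1
        ((r.1, min (res, m).2 r.2) : List Int × Int))
        = ((dfsA tree val g c res).1, min m (pvSM n par val c)) := by
      simp [h2]
    rw [hstep]
    obtain ⟨H1, H2, H3⟩ := ih (fun x hx => hks x (by simp [hx]))
      (dfsA tree val g c res).1 (min m (pvSM n par val c)) hlen
    refine ⟨H1, H2, ?_⟩
    intro j hjj
    constructor
    · rintro ⟨c', hc', hd⟩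
      rcases List.mem_cons.mp hc' with h | h
      · by_cases hrest : ∃ c'' ∈ ks, pvDesc n par c'' j
        · exact (H3 j hjj).1 hrest
        · rw [(H3 j hjj).2 hrest]
          exact (hj j hjj).1 (h ▸ hd)
      · exact (H3 j hjj).1 ⟨c', h, hd⟩
    · intro hno
      have hnrest : ¬ ∃ c'' ∈ ks, pvDesc n par c'' j :=
        fun ⟨c'', h1, h22⟩ => hno ⟨c'', by simp [h1], h22⟩
      rw [(H3 j hjj).2 hnrest, (hj j hjj).2 (fun hd => hno ⟨c, by simp, hd⟩)]

theorem dfsA_ok (n : Int) (par val : List Int) (tree : List (List Int)) (hn : 1 ≤ n)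
    (Htree : ∀ u : Nat, tree.getD u [] =
      (PySem.List.pyRange 2 (n + 1) 1).filter (fun i => pvP n par i == (u : Int))) :
    ∀ (fuel t : Nat) (u : Int) (res : List Int), pvCh n par t 1 u →
      n.toNat ≤ t + fuel → res.length = n.toNat + 1 →
      (dfsA tree val fuel u res).2 = pvSM n par val u ∧
      (dfsA tree val fuel u res).1.length = n.toNat + 1 ∧
      ∀ j : Int, 0 ≤ j →
        (pvDesc n par u j → (dfsA tree val fuel u res).1.getD j.toNat 0 = pvSM n par val j) ∧
        (¬ pvDesc n par u j → (dfsA tree val fuel u res).1.getD j.toNat 0 = res.getD j.toNat 0) := by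
  intro fuel
  induction fuel with
  | zero =>
    intro t u res hc hfuel _
    have := pvCh_bound n par hn t u hc
    omega
  | succ g ih =>
    intro t u res hc hfuel hres
    have hu := pvCh_node n par hn t u hc
    have htk : tree.getD u.toNat [] = pvKids n par u := by
      rw [Htree u.toNat, show ((u.toNat : Nat) : Int) = u from Int.toNat_of_nonneg (by omega)]
      rfl
    have Hrec : ∀ c, c ∈ pvKids n par u → ∀ res' : List Int, res'.length = n.toNat + 1 →
        (dfsA tree val g c res').2 = pvSM n par val c ∧
        (dfsA tree val g c res').1.length = n.toNat + 1 ∧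
        ∀ j : Int, 0 ≤ j →
          (pvDesc n par c j → (dfsA tree val g c res').1.getD j.toNat 0 = pvSM n par val j) ∧
          (¬ pvDesc n par c j → (dfsA tree val g c res').1.getD j.toNat 0 = res'.getD j.toNat 0) :=
      fun c hc' res' hres' => ih (t + 1) c res' (pvCh_kid n par t u c hc hc') (by omega) hres'
    obtain ⟨F1, F2, F3⟩ := dfsA_fold n par val tree u g Hrec (pvKids n par u)
      (fun _ h => h) res ((PySem.List.pyGet? val u).getD 0) hres
    have hSMu := pvSM_unfold n par val hn t u hc
    simp only [dfsA, htk]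
    refine ⟨by rw [F1, hSMu], by simpa using F2, ?_⟩
    intro j hjj
    have hidx : u.toNat < (List.foldl (fun (st : List Int × Int) v =>
        let r := dfsA tree val g v st.1
        (r.1, min st.2 r.2)) (res, (PySem.List.pyGet? val u).getD 0) (pvKids n par u)).1.length := by
      rw [F2]; omega
    constructor
    · intro hd
      by_cases hju : j = u
      · subst hju
        rw [pvGetD_set _ _ _ _ _ hidx, if_pos rfl, F1, hSMu]
      · obtain ⟨c, hck, hcd⟩ := pvDesc_decomp n par u j hd hju
        rw [pvGetD_set _ _ _ _ _ hidx]
        rw [if_neg (by omega), (F3 j hjj).1 ⟨c, hck, hcd⟩]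
    · intro hnd
      have hju : j ≠ u := fun h => hnd (h ▸ pvDesc_self n par u)
      rw [pvGetD_set _ _ _ _ _ hidx, if_neg (by omega)]
      exact (F3 j hjj).2 (fun ⟨c, hck, hcd⟩ => hnd (pvDesc_kid n par u c j hck hcd))

-- -- the adjacency list pvBuild computes --

theorem pvBuild_kids (n : Int) (par : List Int) (hn : 1 ≤ n)
    (HP : ∀ i ∈ PySem.List.pyRange 2 (n + 1) 1, 0 ≤ pvP n par i ∧ pvP n par i ≤ n) :
    ∀ u : Nat, (pvBuild n par).getD u [] =
      (PySem.List.pyRange 2 (n + 1) 1).filter (fun i => pvP n par i == (u : Int)) := by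
  have aux : ∀ (L : List Int) (t : List (List Int)), t.length = n.toNat + 1 →
      (∀ i ∈ L, 0 ≤ pvP n par i ∧ pvP n par i ≤ n) →
      ∀ u : Nat, (L.foldl (fun t i =>
          let p := (PySem.List.pyGet? par i).getD 0
          let j := (if p < 0 then p + (t.length : Int) else p).toNat
          t.set j ((t.getD j []) ++ [i])) t).getD u []
        = t.getD u [] ++ L.filter (fun i => pvP n par i == (u : Int)) := by
    intro L
    induction L with
    | nil => intro t ht hb u; simp
    | cons i L ih =>
      intro t ht hb u
      rw [List.foldl_cons]
      have hp := hb i (by simp)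
      have hlen : ((t.length : Int)) = n + 1 := by
        rw [ht]; push_cast; rw [Int.toNat_of_nonneg (by omega)]
      have hpv : (if (PySem.List.pyGet? par i).getD 0 < 0
          then (PySem.List.pyGet? par i).getD 0 + (t.length : Int)
          else (PySem.List.pyGet? par i).getD 0) = pvP n par i := by
        rw [hlen]; rfl
      simp only [hpv]
      have hidx : (pvP n par i).toNat < t.length := by rw [ht]; omega
      rw [ih _ (by simp [ht]) (fun x hx => hb x (by simp [hx])), List.filter_cons]
      by_cases hequ : pvP n par i = (u : Int)
      · have h1 : (pvP n par i).toNat = u := by omega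
        rw [pvGetD_set _ _ _ _ _ hidx]
        simp [h1, hequ]
      · have h1 : (pvP n par i).toNat ≠ u := by omega
        rw [pvGetD_set _ _ _ _ _ hidx]
        simp [h1, hequ]
  intro u
  unfold pvBuild
  rw [aux _ _ (by simp) (fun i hi => HP i hi) u, pvGetD_replicate]
  rfl

-- -- B-side: levels --

def pvLv (n : Int) (par : List Int) : Nat → List Int
  | 0 => [1]
  | k + 1 => (pvLv n par k).flatMap (fun u => pvKids n par u)

theorem pvLv_chain (n : Int) (par : List Int) :
    ∀ (k : Nat) (x : Int), x ∈ pvLv n par k ↔ pvCh n par k 1 x := by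
  intro k
  induction k with
  | zero => intro x; simp [pvLv, pvCh]
  | succ k ih =>
    intro x
    simp only [pvLv, List.mem_flatMap]
    constructor
    · rintro ⟨u, hu, hx⟩
      exact pvCh_kid n par k u x ((ih u).mp hu) hx
    · intro hx
      obtain ⟨h1, h2, h3⟩ := hx
      exact ⟨pvP n par x, (ih _).mpr h3, (pvKids_mem n par _ x).mpr ⟨h1, by omega, rfl⟩⟩

theorem pvLevels_eq (n : Int) (par : List Int) (tree : List (List Int)) (hn : 1 ≤ n)
    (Htree : ∀ u : Nat, tree.getD u [] =
      (PySem.List.pyRange 2 (n + 1) 1).filter (fun i => pvP n par i == (u : Int))) :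
    ∀ m : Nat, (List.range m).foldl
      (fun (ls : List (List Int)) _ =>
        ls ++ [(ls.getLast?.getD []).flatMap (fun u => tree.getD u.toNat [])])
      [[(1 : Int)]]
      = (List.range (m + 1)).map (pvLv n par) := by
  intro m
  induction m with
  | zero => simp [pvLv]
  | succ m ih =>
    rw [List.range_succ, List.foldl_append, ih, List.foldl_cons, List.foldl_nil]
    have hlast : (((List.range (m + 1)).map (pvLv n par)).getLast?.getD []) = pvLv n par m := by
      rw [List.range_succ, List.map_append]
      simp
    rw [hlast]
    have hfm : (pvLv n par m).flatMap (fun u => tree.getD u.toNat []) = pvLv n par (m + 1) := by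
      show _ = (pvLv n par m).flatMap (fun u => pvKids n par u)
      apply pvFlatMap_congr
      intro x hx
      have hcx := (pvLv_chain n par m x).mp hx
      have hxn := pvCh_node n par hn m x hcx
      rw [Htree x.toNat]
      have : ((x.toNat : Nat) : Int) = x := Int.toNat_of_nonneg (by omega)
      rw [this]
      rfl
    rw [hfm, List.range_succ (n := m + 1), List.map_append]
    simp

-- -- B-side: the relaxation pass --

def pvGood (n : Int) (par val : List Int) (m : Nat) (res : List Int) : Prop :=
  res.length = n.toNat + 1 ∧
  (∀ j : Int, 0 ≤ j → ∀ t, m ≤ t → pvCh n par t 1 j →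
    res.getD j.toNat 0 = pvSM n par val j) ∧
  (∀ j : Int, 0 ≤ j → ¬ pvReach n par j → res.getD j.toNat 0 = 0)

theorem pvLevelFold (n : Int) (par val : List Int) (tree : List (List Int)) (hn : 1 ≤ n)
    (Htree : ∀ u : Nat, tree.getD u [] =
      (PySem.List.pyRange 2 (n + 1) 1).filter (fun i => pvP n par i == (u : Int)))
    (k : Nat) :
    ∀ (l : List Int) (res : List Int), (∀ u ∈ l, pvCh n par k 1 u) →
      pvGood n par val (k + 1) res →
      pvGood n par val (k + 1) (l.foldl
        (fun (r : List Int) u =>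
          let m := (tree.getD u.toNat []).foldl
            (fun m c => if r.getD c.toNat 0 < m then r.getD c.toNat 0 else m)
            ((PySem.List.pyGet? val u).getD 0)
          r.set u.toNat m) res) ∧
      (∀ j : Int, 0 ≤ j →
        (l.foldl (fun (r : List Int) u =>
          let m := (tree.getD u.toNat []).foldl
            (fun m c => if r.getD c.toNat 0 < m then r.getD c.toNat 0 else m)
            ((PySem.List.pyGet? val u).getD 0)
          r.set u.toNat m) res).getD j.toNat 0 = res.getD j.toNat 0 ∨
        (pvCh n par k 1 j ∧
          (l.foldl (fun (r : List Int) u =>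
            let m := (tree.getD u.toNat []).foldl
              (fun m c => if r.getD c.toNat 0 < m then r.getD c.toNat 0 else m)
              ((PySem.List.pyGet? val u).getD 0)
            r.set u.toNat m) res).getD j.toNat 0 = pvSM n par val j)) ∧
      (∀ u ∈ l,
        (l.foldl (fun (r : List Int) u =>
          let m := (tree.getD u.toNat []).foldl
            (fun m c => if r.getD c.toNat 0 < m then r.getD c.toNat 0 else m)
            ((PySem.List.pyGet? val u).getD 0)
          r.set u.toNat m) res).getD u.toNat 0 = pvSM n par val u) := by
  intro l
  induction l with
  | nil =>
    intro res _ hG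
    exact ⟨hG, fun j _ => Or.inl rfl, by simp⟩
  | cons u l ih =>
    intro res hl hG
    obtain ⟨hlen, hGr, hG0⟩ := hG
    have hcu := hl u (by simp)
    have hu := pvCh_node n par hn k u hcu
    have htk : tree.getD u.toNat [] = pvKids n par u := by
      rw [Htree u.toNat, show ((u.toNat : Nat) : Int) = u from Int.toNat_of_nonneg (by omega)]
      rfl
    have hm : (tree.getD u.toNat []).foldl
        (fun m c => if res.getD c.toNat 0 < m then res.getD c.toNat 0 else m)
        ((PySem.List.pyGet? val u).getD 0) = pvSM n par val u := by
      rw [htk, pvSM_unfold n par val hn k u hcu]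
      apply PySem.List.foldl_congr_mem
      intro m c hmc
      have hck := pvCh_kid n par k u c hcu hmc
      have hc2 := pvCh_node n par hn (k + 1) c hck
      rw [hGr c (by omega) (k + 1) (le_refl _) hck, min_def]
      split_ifs <;> omega
    have hidx : u.toNat < res.length := by rw [hlen]; omega
    have hG' : pvGood n par val (k + 1) (res.set u.toNat (pvSM n par val u)) := by
      refine ⟨by simp [hlen], ?_, ?_⟩
      · intro j hj t ht hcj
        have hne : u.toNat ≠ j.toNat := by
          intro he
          have hje : j = u := by omega
          rw [hje] at hcj
          have := pvCh_unique n par t k u hcj hcu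
          omega
        rw [pvGetD_set _ _ _ _ _ hidx, if_neg hne]
        exact hGr j hj t (by omega) hcj
      · intro j hj hnr
        have hne : u.toNat ≠ j.toNat := by
          intro he
          have hje : j = u := by omega
          exact hnr (hje ▸ ⟨k, hcu⟩)
        rw [pvGetD_set _ _ _ _ _ hidx, if_neg hne]
        exact hG0 j hj hnr
    simp only [List.foldl_cons, hm]
    obtain ⟨H1, H2, H3⟩ := ih (res.set u.toNat (pvSM n par val u))
      (fun x hx => hl x (by simp [hx])) hG'
    refine ⟨H1, ?_, ?_⟩
    · intro j hj
      rcases H2 j hj with h | h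
      · rw [h, pvGetD_set _ _ _ _ _ hidx]
        by_cases he : u.toNat = j.toNat
        · have hje : j = u := by omega
          exact Or.inr ⟨hje ▸ hcu, by rw [if_pos he, hje]⟩
        · exact Or.inl (by rw [if_neg he])
      · exact Or.inr h
    · intro x hx
      rcases List.mem_cons.mp hx with h | h
      · subst h
        rcases H2 x (by omega) with h' | h'
        · rw [h', pvGetD_set _ _ _ _ _ hidx, if_pos rfl]
        · exact h'.2
      · exact H3 x h

theorem pvOuterFold (n : Int) (par val : List Int) (tree : List (List Int)) (hn : 1 ≤ n)
    (Htree : ∀ u : Nat, tree.getD u [] =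
      (PySem.List.pyRange 2 (n + 1) 1).filter (fun i => pvP n par i == (u : Int))) :
    ∀ (m : Nat) (res : List Int), pvGood n par val (m + 1) res →
      pvGood n par val 0 (((List.range (m + 1)).map (pvLv n par)).reverse.foldl
        (fun r level =>
          level.foldl
            (fun (r : List Int) u =>
              let m := (tree.getD u.toNat []).foldl
                (fun m c => if r.getD c.toNat 0 < m then r.getD c.toNat 0 else m)
                ((PySem.List.pyGet? val u).getD 0)
              r.set u.toNat m) r) res) := by
  intro m
  induction m with
  | zero =>
    intro res hG
    simp only [List.range_one, List.map_cons, List.map_nil, List.reverse_cons,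
      List.reverse_nil, List.nil_append, List.foldl_cons]
    obtain ⟨H1, _, H3⟩ := pvLevelFold n par val tree hn Htree 0 (pvLv n par 0) res
      (fun u hu => (pvLv_chain n par 0 u).mp hu) hG
    obtain ⟨G1, G2, G3⟩ := H1
    refine ⟨G1, ?_, G3⟩
    intro j hj t _ hcj
    cases t with
    | zero => exact H3 j ((pvLv_chain n par 0 j).mpr hcj)
    | succ t => exact G2 j hj (t + 1) (by omega) hcj
  | succ m ih =>
    intro res hG
    rw [List.range_succ (n := m + 1), List.map_append, List.reverse_append]
    simp only [List.map_cons, List.map_nil, List.reverse_cons, List.reverse_nil,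
      List.nil_append, List.singleton_append, List.foldl_cons]
    obtain ⟨H1, _, H3⟩ := pvLevelFold n par val tree hn Htree (m + 1) (pvLv n par (m + 1)) res
      (fun u hu => (pvLv_chain n par (m + 1) u).mp hu) hG
    apply ih
    obtain ⟨G1, G2, G3⟩ := H1
    refine ⟨G1, ?_, G3⟩
    intro j hj t ht hcj
    rcases Nat.eq_or_lt_of_le ht with he | hlt
    · exact H3 j ((pvLv_chain n par (m + 1) j).mpr (he ▸ hcj))
    · exact G2 j hj t (by omega) hcj

theorem subtree_min_spec : Claim_equal_subtree_min := by
  intro n par val _ hpre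
  obtain ⟨hn, hpar, hval, hbnd⟩ := hpre
  show subtree_min n par val = subtree_min_alt n par val
  have HP : ∀ i ∈ PySem.List.pyRange 2 (n + 1) 1, 0 ≤ pvP n par i ∧ pvP n par i ≤ n := by
    intro i hi
    rw [PySem.List.mem_pyRange_one] at hi
    have hplen : i.toNat < par.length := by
      have := hpar (by omega)
      omega
    have hget : (PySem.List.pyGet? par i).getD 0 = par.getD i.toNat 0 := by
      rw [PySem.List.pyGet?_of_nonneg par (by omega)]
      exact List.getD_eq_getElem?_getD.symm
    have hb := hbnd i.toNat (by omega) (by omega)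
    simp only [pvP]
    rw [hget]
    split_ifs <;> omega
  have Htree := pvBuild_kids n par hn HP
  have hA := dfsA_ok n par val (pvBuild n par) hn Htree (n.toNat + 1) 0 1
    (List.replicate (n.toNat + 1) 0) rfl (by omega) (by simp)
  have hres0 : pvGood n par val (n.toNat + 1) (List.replicate (n.toNat + 1) 0) := by
    refine ⟨by simp, ?_, ?_⟩
    · intro j hj t ht hcj
      have := pvCh_bound n par hn t j hcj
      omega
    · intro j _ _
      exact pvGetD_replicate _ _ _
  have hB := pvOuterFold n par val (pvBuild n par) hn Htree n.toNat _ hres0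
  simp only [subtree_min, subtree_min_alt]
  rw [pvLevels_eq n par (pvBuild n par) hn Htree n.toNat]
  have hslice : ∀ xs : List Int, PySem.List.slice xs (some 1) none = xs.drop 1 :=
    fun xs => by simpa using PySem.List.slice_from_natCast (a := 1) (xs := xs)
  rw [hslice, hslice]
  obtain ⟨A1, A2, A3⟩ := hA
  obtain ⟨B1, B2, B3⟩ := hB
  apply List.ext_getElem
  · rw [List.length_drop, List.length_drop, A2, B1]
  · intro i h1 h2
    rw [List.getElem_drop, List.getElem_drop]
    have hiN : 1 + i < n.toNat + 1 := by
      rw [List.length_drop, A2] at h1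
      omega
    have hj0 : (0 : Int) ≤ ((1 + i : Nat) : Int) := by positivity
    have hjt : (((1 + i : Nat) : Int)).toNat = 1 + i := by omega
    by_cases hr : pvReach n par ((1 + i : Nat) : Int)
    · have ha := (A3 _ hj0).1 hr
      obtain ⟨t, hcj⟩ := hr
      have hb := B2 _ hj0 t (Nat.zero_le t) hcj
      rw [hjt] at ha hb
      rw [List.getD_eq_getElem _ _ (by omega : 1 + i < _)] at ha
      rw [List.getD_eq_getElem _ _ (by omega : 1 + i < _)] at hb
      rw [ha, hb]
    · have ha := (A3 _ hj0).2 hr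
      have hb := B3 _ hj0 hr
      rw [hjt, pvGetD_replicate] at ha
      rw [hjt] at hb
      rw [List.getD_eq_getElem _ _ (by omega : 1 + i < _)] at ha
      rw [List.getD_eq_getElem _ _ (by omega : 1 + i < _)] at hb
      rw [ha, hb]
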